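-- pv_equiv track=rewrite | github.com/andreeabmanea/number_theory | homework_1/reed_solomon.py | compute_free_coefficient_m2
-- ===== SOURCE A (Python) =====
-- def egcd(a, b):
--     if a == 0:
--         return (b, 0, 1)
--     else:
--         g, y, x = egcd(b % a, a)
--         return (g, x - (b // a) * y, y)
--
-- def modinv(a, m):
--     g, x, y = egcd(a, m)
--     if g != 1:
--         raise Exception("Modular inverse does not exist")
--     else:
--         return x % m
--
-- def compute_free_coefficient_m2(z: list, A: list, p: int):
--     # k inversions
--     sum = 0
--     for i in A:
--         A_without_i = A.copy()
--         A_without_i.remove(i)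
--         denominator = 1
--         numerator = 1
--         fraction = 1
--         for j in A_without_i:
--             denominator = denominator * (j - i)
--             numerator = numerator * j
--         fraction = numerator * (modinv((denominator) % p, p))
--         fraction = fraction * z[i]
--         sum = sum + fraction
--
--     return sum % p
-- ===== SOURCE B (Python) =====
-- def _modinv(a, m):
--     # iterative extended Euclid, tracking only the coefficient of a
--     old_r, r = a, m
--     old_s, s = 1, 0
--     while r != 0:
--         q = old_r // r
--         old_r, r = r, old_r - q * r
--         old_s, s = s, old_s - q * s
--     if old_r != 1:
--         raise Exception("Modular inverse does not exist")
--     return old_s % m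
--
-- def compute_free_coefficient_m2(z: list, A: list, p: int):
--     k = len(A)
--     # prefix[t] = product of A[:t], suffix[t] = product of A[t:]
--     prefix = [1] * (k + 1)
--     for t in range(k):
--         prefix[t + 1] = prefix[t] * A[t]
--     suffix = [1] * (k + 1)
--     for t in range(k - 1, -1, -1):
--         suffix[t] = suffix[t + 1] * A[t]
--     total = 0
--     for t in range(k):
--         a_t = A[t]
--         numerator = prefix[t] * suffix[t + 1]
--         denominator = 1
--         for j in range(k):
--             if j != t:
--                 denominator *= A[j] - a_t
--         total += numerator * _modinv(denominator % p, p) * z[a_t]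
--     return total % p
-- ===== Notes on version B (the rewrite author's own statement) =====
-- stated objective: alternative
-- what changed: B iterates by position with precomputed prefix/suffix product tables for the numerators (instead of A's copy-and-remove list per point and a combined numerator/denominator inner loop) and computes modular inverses with an iterative coefficient-only extended Euclid instead of A's recursive three-value egcd; Pre_ excludes exactly the inputs where A raises (non-invertible denominator mod p, p<=0 with nonempty A, or a node value that is an out-of-range index into z).
import Mathlib
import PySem

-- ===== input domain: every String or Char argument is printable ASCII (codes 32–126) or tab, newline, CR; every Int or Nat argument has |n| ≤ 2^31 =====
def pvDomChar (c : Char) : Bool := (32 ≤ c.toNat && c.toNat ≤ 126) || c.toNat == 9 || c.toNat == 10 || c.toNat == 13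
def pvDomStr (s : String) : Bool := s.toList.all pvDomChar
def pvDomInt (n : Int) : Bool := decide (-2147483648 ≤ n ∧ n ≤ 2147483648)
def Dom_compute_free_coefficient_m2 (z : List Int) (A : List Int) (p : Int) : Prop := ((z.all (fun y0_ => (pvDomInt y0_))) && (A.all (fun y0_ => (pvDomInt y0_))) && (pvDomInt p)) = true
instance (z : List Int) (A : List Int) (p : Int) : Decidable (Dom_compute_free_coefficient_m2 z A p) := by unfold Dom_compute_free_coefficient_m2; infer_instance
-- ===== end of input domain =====

-- B computes the same Lagrange free coefficient mod p by position: numerators come from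
-- prefix/suffix product tables, and the modular inverse uses an iterative extended Euclid
-- (coefficient-only) instead of A's recursive egcd.  Objective: alternative decomposition.

-- termination helper for both Euclid loops (cited in decreasing_by)
theorem pymod_natAbs_lt (b a : Int) (h : a ≠ 0) : (PySem.Int.mod b a).natAbs < a.natAbs := by
  rcases lt_or_gt_of_ne h with hneg | hpos
  · have h1 := PySem.Int.mod_neg_bounds (a := b) hneg
    omega
  · have h1 := PySem.Int.mod_nonneg (a := b) hpos
    have h2 := PySem.Int.mod_lt (a := b) hpos
    omega

-- ===== PORT A =====
-- egcd(a, b): recursive extended Euclid, returns (g, x, y)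
def egcdA (a b : Int) : Int × Int × Int :=
  if _h : a = 0 then (b, 0, 1)
  else
    -- g, y, x = egcd(b % a, a); return (g, x - (b // a) * y, y)
    let r := egcdA (PySem.Int.mod b a) a
    (r.1, r.2.2 - (PySem.Int.floordiv b a) * r.2.1, r.2.1)
termination_by a.natAbs
decreasing_by exact pymod_natAbs_lt b a _h

-- modinv(a, m); the `raise` branch is unreachable under Pre_, ported as 0
def modinvA (a m : Int) : Int :=
  let r := egcdA a m
  if r.1 ≠ 1 then 0 else PySem.Int.mod r.2.1 m

def compute_free_coefficient_m2 (z : List Int) (A : List Int) (p : Int) : Int :=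
  let sum := A.foldl (fun sum i =>
    let A_without_i := (PySem.List.remove? A i).getD []   -- i ∈ A, so remove? never fails
    let dn := A_without_i.foldl
      (fun (dn : Int × Int) j => (dn.1 * (j - i), dn.2 * j)) (1, 1)   -- (denominator, numerator)
    let fraction := dn.2 * modinvA (PySem.Int.mod dn.1 p) p
    let fraction := fraction * (PySem.List.pyGet? z i).getD 0         -- z[i]; in range under Pre_
    sum + fraction) 0
  PySem.Int.mod sum p

-- ===== PORT B =====
-- iterative extended Euclid of Source B: while r != 0: q = old_r // r; (old_r, r), (old_s, s) update
def invLoopB (old_r r old_s s : Int) : Int × Int :=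
  if _h : r = 0 then (old_r, old_s)
  else
    let q := PySem.Int.floordiv old_r r
    invLoopB r (old_r - q * r) s (old_s - q * s)
termination_by r.natAbs
decreasing_by
  have : old_r - PySem.Int.floordiv old_r r * r = PySem.Int.mod old_r r := by
    have := PySem.Int.floordiv_mul_add_mod old_r r; omega
  rw [this]; exact pymod_natAbs_lt old_r r _h

def modinvB (a m : Int) : Int :=
  let g := invLoopB a m 1 0
  if g.1 ≠ 1 then 0 else PySem.Int.mod g.2 m   -- the `raise` branch, unreachable under Pre_, ported as 0

-- suffix[t] = product of A[t:], built by Source B's backward pass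
def suffixProds : List Int → List Int
  | [] => [1]
  | a :: rest =>
    let s := suffixProds rest
    (a * s.headD 1) :: s

def compute_free_coefficient_m2_alt (z : List Int) (A : List Int) (p : Int) : Int :=
  let k := A.length
  let pre := List.scanl (· * ·) 1 A          -- forward pass: pre[t] = product of A[:t]
  let suf := suffixProds A
  let total := (List.range k).foldl (fun total t =>
    let a_t := A.getD t 0
    let numerator := pre.getD t 1 * suf.getD (t + 1) 1
    let denominator := (List.range k).foldl
      (fun den j => if j ≠ t then den * (A.getD j 0 - a_t) else den) 1
    total + numerator * modinvB (PySem.Int.mod denominator p) p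
      * (PySem.List.pyGet? z a_t).getD 0) 0
  PySem.Int.mod total p

-- ===== PRECONDITION & SPEC =====
-- the denominator A's loop at position t builds (first occurrence of the value removed)
def pvDenomAt (A : List Int) (t : Nat) : Int :=
  let i := A.getD t 0
  (((A.erase i).map (fun j => j - i)).prod)

-- exactly the inputs where A returns: p ≠ 0 (no ZeroDivisionError), p > 0 when A ≠ []
-- (for p < 0 the recursive egcd yields a negative g ≠ 1 and modinv raises), every node value
-- a valid Python index into z (no IndexError), and each denominator invertible mod p.
def Pre_compute_free_coefficient_m2 (z : List Int) (A : List Int) (p : Int) : Prop :=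
  p ≠ 0 ∧ (A ≠ [] → 0 < p) ∧
  ∀ t < A.length,
    (PySem.List.pyGet? z (A.getD t 0)).isSome ∧
    Int.gcd (PySem.Int.mod (pvDenomAt A t) p) p = 1
instance (z : List Int) (A : List Int) (p : Int) : Decidable (Pre_compute_free_coefficient_m2 z A p) := by unfold Pre_compute_free_coefficient_m2; infer_instance

def pvWitness_compute_free_coefficient_m2 : List Int × List Int × Int := ([5, 7], [0, 1], 3)

def Spec_compute_free_coefficient_m2 (z : List Int) (A : List Int) (p : Int) (out : Int) : Prop := out = compute_free_coefficient_m2_alt z A p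
instance (z : List Int) (A : List Int) (p : Int) (out : Int) : Decidable (Spec_compute_free_coefficient_m2 z A p out) := by unfold Spec_compute_free_coefficient_m2; infer_instance

-- ===== CLAIM (what is proved, stated in full; the proofs are below) =====
def Claim_equal_compute_free_coefficient_m2 : Prop := ∀ (z : List Int) (A : List Int) (p : Int), Dom_compute_free_coefficient_m2 z A p → Pre_compute_free_coefficient_m2 z A p → Spec_compute_free_coefficient_m2 z A p (compute_free_coefficient_m2 z A p)

-- ===== LEMMAS AND PROOFS =====

theorem egcdA_bezout (a b : Int) :
    (egcdA a b).2.1 * a + (egcdA a b).2.2 * b = (egcdA a b).1 := by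
  induction a, b using egcdA.induct with
  | case1 b => simp [egcdA]
  | case2 a b h ih =>
    rw [egcdA]
    simp only [h, dite_false]
    have hd := PySem.Int.floordiv_mul_add_mod b a
    linear_combination ih - (egcdA (PySem.Int.mod b a) a).2.1 * hd

theorem egcdA_gcd (a b : Int) : 0 ≤ a → 0 ≤ b →
    (egcdA a b).1 = Int.gcd a b := by
  induction a, b using egcdA.induct with
  | case1 b =>
    intro _ hb
    simp [egcdA]
    exact (abs_of_nonneg hb).symm
  | case2 a b h ih =>
    intro ha _
    rw [egcdA]; simp only [h, dite_false]
    have hpos : 0 < a := lt_of_le_of_ne ha (Ne.symm h)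
    have hmodeq : PySem.Int.mod b a = b % a := PySem.Int.mod_eq_emod_of_pos (a:=b) hpos
    have hmnn : 0 ≤ PySem.Int.mod b a := PySem.Int.mod_nonneg (a:=b) hpos
    rw [ih hmnn ha, hmodeq]
    rw [show Int.gcd (b % a) a = Int.gcd b a from Int.gcd_emod b a, Int.gcd_comm]

theorem invLoopB_gcd (old_r r old_s s : Int) : 0 ≤ old_r → 0 ≤ r →
    (invLoopB old_r r old_s s).1 = Int.gcd old_r r := by
  induction old_r, r, old_s, s using invLoopB.induct with
  | case1 old_r old_s =>
    intro h1 _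
    simp [invLoopB]
    exact (abs_of_nonneg h1).symm
  | case2 old_r r old_s s h q ih =>
    intro h1 h2
    rw [invLoopB]; simp only [h, dite_false]
    have hpos : 0 < r := lt_of_le_of_ne h2 (Ne.symm h)
    have hmod : old_r - q * r = PySem.Int.mod old_r r := by
      have := PySem.Int.floordiv_mul_add_mod old_r r; simp only [q]; omega
    have hmnn : 0 ≤ PySem.Int.mod old_r r := PySem.Int.mod_nonneg (a:=old_r) hpos
    rw [show (PySem.Int.floordiv old_r r) = q from rfl, ih h2 (hmod ▸ hmnn), hmod,
      PySem.Int.mod_eq_emod_of_pos (a:=old_r) hpos, Int.gcd_comm]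
    exact_mod_cast Int.gcd_emod old_r r

theorem invLoopB_coeff (a m old_r r old_s s : Int)
    (h1 : old_s * a ≡ old_r [ZMOD m]) (h2 : s * a ≡ r [ZMOD m]) :
    ((invLoopB old_r r old_s s).2 * a ≡ (invLoopB old_r r old_s s).1 [ZMOD m]) := by
  induction old_r, r, old_s, s using invLoopB.induct with
  | case1 old_r old_s =>
    simpa [invLoopB] using h1
  | case2 old_r r old_s s h q ih =>
    rw [invLoopB]; simp only [h, dite_false]
    exact ih h2 (by
      have : (old_s - q * s) * a = old_s * a - q * (s * a) := by ring
      rw [this]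
      exact Int.ModEq.sub h1 (Int.ModEq.mul_left q h2))

theorem pvInvUnique (a m x y : Int) (hm : 0 < m)
    (hx : x * a ≡ 1 [ZMOD m]) (hy : y * a ≡ 1 [ZMOD m]) :
    PySem.Int.mod x m = PySem.Int.mod y m := by
  have : x ≡ y [ZMOD m] := by
    calc x ≡ x * (y * a) [ZMOD m] := by
            have := (Int.ModEq.mul_left x hy).symm
            simpa using this
      _ = y * (x * a) := by ring
      _ ≡ y * 1 [ZMOD m] := Int.ModEq.mul_left y hx
      _ = y := by ring
  rw [PySem.Int.mod_eq_emod_of_pos (a:=x) hm, PySem.Int.mod_eq_emod_of_pos (a:=y) hm]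
  exact this

theorem modinv_eq (a m : Int) (ha : 0 ≤ a) (hm : 0 < m) : modinvA a m = modinvB a m := by
  have hgA : (egcdA a m).1 = Int.gcd a m := egcdA_gcd a m ha hm.le
  have hgB : (invLoopB a m 1 0).1 = Int.gcd a m := invLoopB_gcd a m 1 0 ha hm.le
  unfold modinvA modinvB
  simp only [hgA, hgB]
  by_cases hone : (Int.gcd a m : Int) = 1
  · simp only [hone, ne_eq, not_true_eq_false, if_false]
    apply pvInvUnique a m _ _ hm
    · have hb := egcdA_bezout a m
      rw [hgA, hone] at hb
      have : m ∣ 1 - (egcdA a m).2.1 * a := ⟨(egcdA a m).2.2, by linarith⟩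
      exact (Int.modEq_iff_dvd.mpr (by simpa using this)).symm.symm
    · have := invLoopB_coeff a m a m 1 0 (by simp) (by
        show (0 : Int) * a ≡ m [ZMOD m]
        simpa using (Int.modEq_iff_dvd.mpr (by simp)))
      rw [hgB, hone] at this
      exact this
  · simp [hone]

theorem foldl_mul_map (l : List Int) (f : Int → Int) (c : Int) :
    l.foldl (fun a x => a * f x) c = c * (l.map f).prod := by
  induction l generalizing c with
  | nil => simp
  | cons a l ih => simp [ih]; ring

theorem foldl_if_mul (r : Nat) (f : Nat → Int) (l : List Nat) (c : Int) :
    l.foldl (fun acc j => if j ≠ r then acc * f j else acc) c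
      = c * (l.map (fun j => if j ≠ r then f j else 1)).prod := by
  induction l generalizing c with
  | nil => simp
  | cons a l ih =>
    simp only [List.foldl_cons, List.map_cons, List.prod_cons]
    by_cases h : a ≠ r
    · rw [if_pos h, if_pos h, ih]; ring
    · rw [if_neg h, if_neg h, ih]; ring

theorem map_getD_offset (l : List Int) (f : Int → Int) (d m : Nat) (h : d + m ≤ l.length) :
    (List.range m).map (fun x => f (l.getD (d + x) 0)) = ((l.drop d).take m).map f := by
  apply List.ext_getElem
  · simp; omega
  · intro n h1 h2
    have hm : n < m := by simpa using h1
    have hl : d + n < l.length := by omega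
    simp only [List.getElem_map, List.getElem_range, List.getElem_take, List.getElem_drop]
    rw [List.getD_eq_getElem _ _ hl]

theorem scanl_getD (l : List Int) (c : Int) (n : Nat) (h : n ≤ l.length) :
    (List.scanl (· * ·) c l).getD n 1 = c * (l.take n).prod := by
  induction l generalizing c n with
  | nil =>
    cases n with
    | zero => simp
    | succ n => simp at h
  | cons a l ih =>
    cases n with
    | zero => simp
    | succ n =>
      simp only [List.scanl_cons, List.getD_cons_succ, List.take_succ_cons, List.prod_cons]
      rw [ih (c * a) n (by simpa using h)]
      ring

theorem suffixProds_headD (l : List Int) : (suffixProds l).headD 1 = l.prod := by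
  induction l with
  | nil => simp [suffixProds]
  | cons a l ih => simp only [suffixProds, List.headD_cons, List.prod_cons, ih]

theorem suffixProds_getD (l : List Int) (n : Nat) (h : n ≤ l.length) :
    (suffixProds l).getD n 1 = (l.drop n).prod := by
  induction l generalizing n with
  | nil =>
    cases n with
    | zero => simp [suffixProds]
    | succ n => simp at h
  | cons a l ih =>
    cases n with
    | zero =>
      simp only [suffixProds, List.getD_cons_zero, List.drop_zero, List.prod_cons,
        suffixProds_headD]
    | succ n =>
      simp only [suffixProds, List.getD_cons_succ, List.drop_succ_cons]
      exact ih n (by simpa using h)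

-- removing the first occurrence of A[t] is a permutation of removing position t
theorem erase_perm_take_drop (A : List Int) (t : Nat) (ht : t < A.length) :
    (A.erase A[t]).Perm (A.take t ++ A.drop (t + 1)) := by
  have hmem : A[t] ∈ A := List.getElem_mem ht
  have hA : A = A.take t ++ A[t] :: A.drop (t + 1) := by
    conv_lhs => rw [← List.take_append_drop t A]
    congr 1
    exact (List.getElem_cons_drop ht).symm
  have h1 : A.Perm (A[t] :: A.erase A[t]) := List.perm_cons_erase hmem
  have h2 : A.Perm (A[t] :: (A.take t ++ A.drop (t + 1))) := by
    conv_lhs => rw [hA]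
    exact List.perm_middle
  exact (h1.symm.trans h2).cons_inv

theorem pvTermEq (z A : List Int) (p : Int) (hp : 0 < p) (t : Nat) (ht : t < A.length) :
    (List.foldl (fun dn j => (dn.1 * (j - A[t]), dn.2 * j)) ((1:Int), (1:Int)) ((PySem.List.remove? A A[t]).getD [])).2 *
        modinvA
          (PySem.Int.mod
            (List.foldl (fun dn j => (dn.1 * (j - A[t]), dn.2 * j)) ((1:Int), (1:Int)) ((PySem.List.remove? A A[t]).getD [])).1 p)
          p *
      (PySem.List.pyGet? z A[t]).getD 0 =
    (List.scanl (fun x1 x2 => x1 * x2) 1 A).getD t 1 *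
          (suffixProds A).getD (t + 1) 1 *
        modinvB
          (PySem.Int.mod
            (List.foldl
              (fun den j =>
                if j ≠ t then den * (A.getD j 0 - A.getD t 0) else den)
              1 (List.range A.length))
            p)
          p *
      (PySem.List.pyGet? z (A.getD t 0)).getD 0 := by
  have hgd : A.getD t 0 = A[t] := List.getD_eq_getElem A 0 ht
  rw [hgd]
  set i : Int := A[t] with hidef
  have hmem : i ∈ A := List.getElem_mem ht
  set pre : List Int := A.take t with hpre
  set suf : List Int := A.drop (t + 1) with hsuf
  have hperm : (A.erase i).Perm (pre ++ suf) := erase_perm_take_drop A t ht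
  have hrem : (PySem.List.remove? A i).getD [] = A.erase i := by
    rw [PySem.List.remove?_eq_some_erase A i hmem, Option.getD_some]
  rw [hrem]
  rw [PySem.List.foldl_prod_mk (f := fun d j => d * (j - i)) (g := fun n j => n * j)]
  have hA : A = pre ++ i :: suf := by
    conv_lhs => rw [← List.take_append_drop t A]
    congr 1
    exact (List.getElem_cons_drop ht).symm
  have hlen : pre.length = t := List.length_take_of_le (le_of_lt ht)
  have hAlen : A.length = t + 1 + suf.length := by
    rw [hA, List.length_append, List.length_cons, hlen]; omega
  rw [scanl_getD A 1 t (by omega), suffixProds_getD A (t + 1) (by omega)]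
  have hden : (List.foldl (fun den j => if j ≠ t then den * (A.getD j 0 - i) else den) 1
      (List.range A.length))
      = List.foldl (fun d j => d * (j - i)) 1 (A.erase i) := by
    rw [foldl_if_mul t (fun j => A.getD j 0 - i) (List.range A.length) 1,
      foldl_mul_map (A.erase i) (fun j => j - i) 1]
    rw [(hperm.map (fun j => j - i)).prod_eq]
    congr 1
    have h1 : (List.range t).map (fun j => if j ≠ t then A.getD j 0 - i else 1)
        = pre.map (fun j => j - i) := by
      rw [List.map_congr_left (f := fun j => if j ≠ t then A.getD j 0 - i else 1)
        (g := fun j => A.getD j 0 - i)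
        (fun j hj => if_pos (Nat.ne_of_lt (List.mem_range.mp hj)))]
      have h0 := map_getD_offset A (fun x => x - i) 0 t (by omega)
      simpa [← hpre, List.take_eq_take_iff] using h0
    have h3 : (List.range suf.length).map (fun x => if t + 1 + x ≠ t then A.getD (t + 1 + x) 0 - i else 1)
        = suf.map (fun j => j - i) := by
      rw [List.map_congr_left (g := fun x => A.getD (t + 1 + x) 0 - i)
        (fun x hx => if_pos (by omega))]
      have h0 := map_getD_offset A (fun x => x - i) (t + 1) suf.length (by omega)
      have hts : (A.drop (t + 1)).take suf.length = suf := by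
        rw [← hsuf]; exact List.take_length
      rw [hts] at h0
      simpa using h0
    rw [hAlen, List.range_add, List.range_succ]
    simp only [List.map_append, List.prod_append, List.map_map, Function.comp_def]
    rw [h1, h3]
    simp
  rw [hden, foldl_mul_map (A.erase i) (fun j => j - i) 1, foldl_mul_map (A.erase i) (fun j => j) 1,
    modinv_eq _ p (PySem.Int.mod_nonneg _ hp) hp]
  simp only [List.map_id']
  rw [(hperm.prod_eq), List.prod_append]
  ring

-- ===== VERDICT (by name: the statement is the Claim_ definition above) =====
theorem compute_free_coefficient_m2_spec : Claim_equal_compute_free_coefficient_m2 := by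
  intro z A p _hdom hpre
  obtain ⟨hp0, hpnil, hts⟩ := hpre
  show compute_free_coefficient_m2 z A p = compute_free_coefficient_m2_alt z A p
  simp only [compute_free_coefficient_m2, compute_free_coefficient_m2_alt]
  rw [PySem.List.foldl_add, PySem.List.foldl_add]
  congr 1
  rw [zero_add, zero_add]
  congr 1
  apply List.ext_getElem
  · simp
  · intro t h1 h2
    simp only [List.getElem_map, List.getElem_range]
    have ht : t < A.length := by simpa using h1
    exact pvTermEq z A p (hpnil (List.ne_nil_of_length_pos (by omega))) t ht
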